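-- pv_equiv track=rewrite | github.com/irtaza780/technical_debt_findings | refactored_code_v3/Mastermind_DefaultOrganization_20250924001636/game_logic.py | _count_partial_matches
-- ===== SOURCE A (Python) =====
-- from collections import Counter
-- from typing import List, Tuple, Dict, Optional
--
-- def _count_partial_matches(
--     unmatched_secret: List[str],
--     unmatched_guess: List[str],
-- ) -> int:
--     """
--     Count partial matches from unmatched symbols.
--
--     For each symbol in the guess, count how many times it appears in the
--     secret, limited by the minimum of its frequency in both lists.
--
--     Args:
--         unmatched_secret: Symbols from secret code that weren't exact matches.
--         unmatched_guess: Symbols from guess that weren't exact matches.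
--
--     Returns:
--         Number of partial matches.
--     """
--     secret_counts = Counter(unmatched_secret)
--     guess_counts = Counter(unmatched_guess)
--     # Sum minimum counts for each symbol present in guess
--     return sum(
--         min(secret_counts[symbol], guess_counts[symbol])
--         for symbol in guess_counts
--     )
-- ===== SOURCE B (Python) =====
-- def _count_partial_matches(unmatched_secret, unmatched_guess):
--     """Count multiset overlap by a two-pointer merge over sorted copies."""
--     a = sorted(unmatched_secret)
--     b = sorted(unmatched_guess)
--     i = j = matches = 0
--     while i < len(a) and j < len(b):
--         if a[i] == b[j]:
--             matches += 1
--             i += 1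
--             j += 1
--         elif a[i] < b[j]:
--             i += 1
--         else:
--             j += 1
--     return matches
-- ===== Notes on version B (the rewrite author's own statement) =====
-- stated objective: alternative
-- what changed: Replaces the Counter hash-table construction and per-key min summation with sorted copies of both lists and a two-pointer merge that counts equal elements.
import Mathlib
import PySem

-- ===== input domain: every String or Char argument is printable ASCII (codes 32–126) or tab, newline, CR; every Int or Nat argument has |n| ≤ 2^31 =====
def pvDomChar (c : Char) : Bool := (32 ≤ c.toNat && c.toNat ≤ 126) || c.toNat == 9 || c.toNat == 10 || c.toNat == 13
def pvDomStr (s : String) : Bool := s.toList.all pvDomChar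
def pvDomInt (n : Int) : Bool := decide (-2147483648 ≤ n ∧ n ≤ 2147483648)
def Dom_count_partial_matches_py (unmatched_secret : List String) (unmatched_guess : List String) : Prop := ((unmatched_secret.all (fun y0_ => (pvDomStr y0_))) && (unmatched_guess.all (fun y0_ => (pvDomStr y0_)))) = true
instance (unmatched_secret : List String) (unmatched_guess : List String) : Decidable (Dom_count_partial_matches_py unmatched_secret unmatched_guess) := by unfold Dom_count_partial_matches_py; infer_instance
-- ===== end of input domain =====

-- B replaces the Counter/hash-table approach with sorted copies and a two-pointer merge (objective: alternative algorithm, same result).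

-- ===== PORT A =====
-- Counter(unmatched_secret), Counter(unmatched_guess); sum of min counts over guess_counts' keys.
def count_partial_matches_py (unmatched_secret : List String) (unmatched_guess : List String) : Int :=
  let secret_counts := PySem.Dict.counter unmatched_secret
  let guess_counts := PySem.Dict.counter unmatched_guess
  (guess_counts.keys.map (fun symbol => min (secret_counts.getD symbol 0) (guess_counts.getD symbol 0))).sum

-- ===== PORT B =====
-- the while loop of Source B: advance two indices through the sorted lists (tail recursion = index advance)
def pvMergeCount : List String → List String → Int
  | [], _ => 0
  | _ :: _, [] => 0
  | x :: xs, y :: ys =>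
    if x = y then pvMergeCount xs ys + 1
    else if x < y then pvMergeCount xs (y :: ys)
    else pvMergeCount (x :: xs) ys
  termination_by a b => a.length + b.length

def count_partial_matches_py_alt (unmatched_secret : List String) (unmatched_guess : List String) : Int :=
  pvMergeCount (PySem.List.sorted unmatched_secret (fun x => x) false)
               (PySem.List.sorted unmatched_guess (fun x => x) false)

-- ===== PRECONDITION & SPEC =====
def Spec_count_partial_matches_py (unmatched_secret : List String) (unmatched_guess : List String) (out : Int) : Prop := out = count_partial_matches_py_alt unmatched_secret unmatched_guess
instance (unmatched_secret : List String) (unmatched_guess : List String) (out : Int) : Decidable (Spec_count_partial_matches_py unmatched_secret unmatched_guess out) := by unfold Spec_count_partial_matches_py; infer_instance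

-- ===== CLAIM (what is proved, stated in full; the proofs are below) =====
def Claim_equal_count_partial_matches_py : Prop := ∀ (unmatched_secret : List String) (unmatched_guess : List String), Dom_count_partial_matches_py unmatched_secret unmatched_guess → Spec_count_partial_matches_py unmatched_secret unmatched_guess (count_partial_matches_py unmatched_secret unmatched_guess)

-- ===== LEMMAS AND PROOFS =====

-- the common yardstick: cardinality of the multiset intersection
def pvM (a b : List String) : Nat := ((a : Multiset String) ∩ (b : Multiset String)).card

-- ---- B side: the merge on two sorted lists computes the multiset-intersection cardinality ----
theorem pvM_cons_left (x : String) (xs b : List String) (h : x ∉ b) :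
    pvM (x :: xs) b = pvM xs b := by
  unfold pvM
  rw [show ((x :: xs : List String) : Multiset String) = x ::ₘ ↑xs from rfl,
      Multiset.cons_inter_of_neg _ (by simpa using h)]

theorem pvM_cons_right (s y : _) (ys : List String) (h : y ∉ s) :
    pvM s (y :: ys) = pvM s ys := by
  unfold pvM
  rw [Multiset.inter_comm, show ((y :: ys : List String) : Multiset String) = y ::ₘ ↑ys from rfl,
      Multiset.cons_inter_of_neg _ (by simpa using h), Multiset.inter_comm]

theorem pvMergeCount_eq (a b : List String)
    (ha : a.Pairwise (· ≤ ·)) (hb : b.Pairwise (· ≤ ·)) :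
    pvMergeCount a b = (pvM a b : Int) := by
  fun_induction pvMergeCount a b with
  | case1 b => simp [pvM]
  | case2 x xs => simp [pvM]
  | case3 xs y ys ih =>
    rw [ih ha.of_cons hb.of_cons]
    unfold pvM
    rw [show ((y :: xs : List String) : Multiset String) = y ::ₘ ↑xs from rfl,
        show ((y :: ys : List String) : Multiset String) = y ::ₘ ↑ys from rfl,
        Multiset.cons_inter_of_pos _ (Multiset.mem_cons_self y ↑ys),
        Multiset.erase_cons_head]
    push_cast [Multiset.card_cons]
    ring
  | case4 x xs y ys hne hlt ih =>
    rw [ih ha.of_cons hb, pvM_cons_left]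
    intro hmem
    rcases List.mem_cons.mp hmem with h | h
    · exact hne h
    · exact absurd (lt_of_lt_of_le hlt ((List.pairwise_cons.mp hb).1 x h)) (lt_irrefl x)
  | case5 x xs y ys hne hnlt ih =>
    rw [ih ha hb.of_cons, pvM_cons_right]
    intro hmem
    have hy : y < x := lt_of_le_of_ne (not_lt.mp hnlt) (fun h => hne h.symm)
    rcases List.mem_cons.mp hmem with h | h
    · exact absurd (h ▸ hy) (lt_irrefl _)
    · exact absurd (lt_of_lt_of_le hy ((List.pairwise_cons.mp ha).1 y h)) (lt_irrefl y)

-- ---- A side: the Counter sum equals the multiset-intersection cardinality ----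
theorem pvM_eq_sum (s g : List String) :
    pvM s g = (g.dedup.map (fun x => min (s.count x) (g.count x))).sum := by
  unfold pvM
  rw [← Multiset.toFinset_sum_count_eq]
  rw [Finset.sum_subset (h := fun x hx => ?_) (hf := fun x hx hnx => ?_)
      (s₁ := (↑s ∩ ↑g : Multiset String).toFinset) (s₂ := g.toFinset)]
  · rw [show g.toFinset = g.dedup.toFinset from by ext a; simp [List.mem_dedup],
        List.sum_toFinset _ (List.nodup_dedup g)]
    refine congrArg _ (List.map_congr_left fun x hx => ?_)
    simp
  · rw [Multiset.mem_toFinset, Multiset.mem_inter] at hx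
    simpa using hx.2
  · rw [Multiset.count_eq_zero]
    simpa using hnx

theorem pvSum (s g : List String) :
    ((PySem.Set.ofList g).map (fun x => min ((s.count x : Int)) (g.count x))).sum
      = (pvM s g : Int) := by
  have h1 : (PySem.Set.ofList g).map (fun x => min ((s.count x : Int)) (g.count x))
      = ((PySem.Set.ofList g).map (fun x => min (s.count x) (g.count x))).map
          (fun n : Nat => (n : Int)) := by
    rw [List.map_map]
    exact List.map_congr_left fun x _ => (Nat.cast_min _ _).symm
  have hperm : ((PySem.Set.ofList g).map (fun x => min (s.count x) (g.count x))).Perm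
      (g.dedup.map (fun x => min (s.count x) (g.count x))) := by
    refine List.Perm.map _ ?_
    rw [List.perm_ext_iff_of_nodup (PySem.Set.nodup_ofList g) (List.nodup_dedup g)]
    intro a
    simp [PySem.Set.mem_ofList, List.mem_dedup]
  rw [h1]
  have h2 : ∀ l : List Nat, ((l.map (fun n : Nat => (n : Int))).sum) = ((l.sum : Nat) : Int) := by
    intro l; induction l with
    | nil => simp
    | cons x t ih => simp only [List.map_cons, List.sum_cons, ih, Nat.cast_add]
  rw [h2, hperm.sum_eq, pvM_eq_sum]

theorem pvCounterSum_eq (s g : List String) :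
    count_partial_matches_py s g = (pvM s g : Int) := by
  unfold count_partial_matches_py
  simp only [PySem.Dict.keys_counter, PySem.Dict.getD_counter]
  exact pvSum s g

-- ===== VERDICT (by name: the statement is the Claim_ definition above) =====
theorem count_partial_matches_py_spec : Claim_equal_count_partial_matches_py := by
  intro s g _
  show count_partial_matches_py s g = count_partial_matches_py_alt s g
  rw [pvCounterSum_eq]
  rw [count_partial_matches_py_alt,
      pvMergeCount_eq _ _ (PySem.List.sorted_pairwise _ _) (PySem.List.sorted_pairwise _ _)]
  unfold pvM
  rw [Multiset.coe_eq_coe.mpr (PySem.List.sorted_perm s (fun x => x) false),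
      Multiset.coe_eq_coe.mpr (PySem.List.sorted_perm g (fun x => x) false)]
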